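-- pv_equiv track=rewrite | github.com/pdr9rc/hexy | backend/utils/ascii_processor.py | process_ascii_blocks
-- ===== SOURCE A (Python) =====
-- from typing import Dict, Any, List, Optional
--
-- def process_ascii_blocks(content: str) -> Dict[str, Any]:
--     """
--     Process content and extract ASCII art blocks.
--
--     Args:
--         content: Content string that may contain ASCII art blocks
--
--     Returns:
--         Dictionary containing processed data with ASCII art sections
--     """
--     data = {
--         'name': None,
--         'description': None,
--         'encounter': None,
--         'atmosphere': None,
--         'notable_feature': None,
--         'local_tavern': None,
--         'local_power': None,
--         'settlement_art': None,
--         'tavern_details': None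
--     }
--
--     current_section = None
--     section_content = []
--     in_ascii = False
--     ascii_lines = []
--
--     lines = content.split('\n')
--
--     for i, line in enumerate(lines):
--         line = line.strip()
--         if not line:
--             continue
--
--         # ASCII art block detection
--         if line == '```':
--             in_ascii = not in_ascii
--             if not in_ascii:
--                 # End of ASCII art block
--                 if ascii_lines:
--                     data['settlement_art'] = '\n'.join(ascii_lines)
--                     ascii_lines = []
--             continue
--
--         if in_ascii:
--             ascii_lines.append(line)
--             continue
--
--         # Section header detection
--         if line.startswith('## '):
--             # Save previous section
--             if current_section and section_content:
--                 section_text = '\n'.join(section_content).strip()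
--                 if current_section in data:
--                     if current_section == 'tavern_details':
--                         # Don't overwrite tavern_details with string content
--                         pass
--                     else:
--                         data[current_section] = section_text
--                 section_content = []
--
--             # Start new section
--             current_section = line[3:].lower().replace(' ', '_')
--             continue
--
--         # Content line
--         if current_section:
--             section_content.append(line)
--         else:
--             # Handle lines before first section
--             if line.startswith('**') and line.endswith('**'):
--                 # This might be a title
--                 data['name'] = line.strip('*')
--             elif not data.get('description'):
--                 # First non-empty line might be description
--                 data['description'] = line
--
--     # Save last section
--     if current_section and section_content:
--         section_text = '\n'.join(section_content).strip()
--         if current_section in data: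
--             if current_section == 'tavern_details':
--                 # Don't overwrite tavern_details with string content
--                 pass
--             else:
--                 data[current_section] = section_text
--
--     return data
-- ===== SOURCE B (Python) =====
-- def process_ascii_blocks(content):
--     """Fence-partition re-implementation: split the stripped, non-blank lines on
--     ``` fences into alternating text/ASCII chunks, then consume the chunks
--     pairwise (text chunk, closed art chunk), grouping each text chunk on
--     '## ' headers."""
--     data = {'name': None, 'description': None, 'encounter': None,
--             'atmosphere': None, 'notable_feature': None, 'local_tavern': None,
--             'local_power': None, 'settlement_art': None, 'tavern_details': None}
--
--     lines = [s for s in (raw.strip() for raw in content.split('\n')) if s]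
--
--     # partition on ``` fences: chunks[0], chunks[2], ... are ordinary text,
--     # chunks[1], chunks[3], ... are the interiors of ASCII-art blocks
--     chunks = []
--     cur = []
--     for s in lines:
--         if s == '```':
--             chunks.append(cur)
--             cur = []
--         else:
--             cur.append(s)
--     chunks.append(cur)
--
--     section = None
--     body = []
--
--     def flush():
--         if section and body and section in data and section != 'tavern_details':
--             data[section] = '\n'.join(body).strip()
--
--     rest = chunks
--     while True:
--         # --- text chunk: group it on '## ' headers ---
--         groups = []
--         g = []
--         for line in rest[0]:
--             if line.startswith('## '):
--                 groups.append(g)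
--                 g = [line]
--             else:
--                 g.append(line)
--         groups.append(g)
--         head = groups[0]
--         if not section:
--             for line in head:
--                 if line.startswith('**') and line.endswith('**'):
--                     data['name'] = line.strip('*')
--                 elif not data['description']:
--                     data['description'] = line
--         else:
--             body = body + head
--         for grp in groups[1:]:
--             flush()
--             section = grp[0][3:].lower().replace(' ', '_')
--             body = grp[1:]
--         # --- following ASCII chunk (a trailing unclosed one is dropped) ---
--         if len(rest) < 3:
--             break
--         if rest[1]:
--             data['settlement_art'] = '\n'.join(rest[1])
--         rest = rest[2:]
--     flush()
--     return data
-- ===== Notes on version B (the rewrite author's own statement) =====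
-- stated objective: alternative
-- what changed: Instead of A's single line-by-line state machine with in_ascii/ascii_lines flags, B pre-partitions the stripped non-blank lines on the code-fence marker into alternating text/ASCII chunks, consumes them pairwise (dropping a trailing unclosed block), and groups each text chunk on section-header lines before applying the section/preamble rules.
import Mathlib
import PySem

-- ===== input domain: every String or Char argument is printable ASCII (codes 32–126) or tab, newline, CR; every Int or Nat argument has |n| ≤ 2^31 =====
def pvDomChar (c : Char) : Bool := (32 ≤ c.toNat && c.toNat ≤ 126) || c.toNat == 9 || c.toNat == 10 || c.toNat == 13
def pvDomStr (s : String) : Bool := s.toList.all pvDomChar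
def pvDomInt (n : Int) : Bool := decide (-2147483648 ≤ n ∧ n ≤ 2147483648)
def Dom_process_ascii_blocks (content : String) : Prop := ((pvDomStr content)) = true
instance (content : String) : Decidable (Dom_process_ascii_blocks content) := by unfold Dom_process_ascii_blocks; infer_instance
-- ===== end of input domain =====

-- B re-implements A by pre-partitioning the stripped non-blank lines on ``` fences into
-- alternating text/ASCII chunks consumed pairwise, grouping each text chunk on '## ' headers
-- (objective: a different decomposition of the same linear scan; same cost).

-- ===== PORT A =====

-- the initial dict literal (shared by both ports, as in both Pythons)
def pvData0 : PySem.Dict String (Option String) :=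
  PySem.Dict.mk [("name", none), ("description", none), ("encounter", none),
    ("atmosphere", none), ("notable_feature", none), ("local_tavern", none),
    ("local_power", none), ("settlement_art", none), ("tavern_details", none)]

-- Python truthiness of an Optional[str] (None and '' are falsy)
def pvTruthy : Option String → Bool
  | none => false
  | some s => !(s == "")

-- A's state: (data, current_section, section_content, in_ascii, ascii_lines)
structure PvStA where
  data : PySem.Dict String (Option String)
  cur : Option String
  sec : List String
  inAscii : Bool
  ascii : List String

-- A's "save previous section" block (returns the new data and section_content)
def pvSaveA (data : PySem.Dict String (Option String)) (cur : Option String)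
    (sec : List String) : PySem.Dict String (Option String) × List String :=
  if pvTruthy cur && !sec.isEmpty then
    let s := cur.getD ""
    let txt := PySem.Str.strip (PySem.Str.join "\n" sec)
    (if data.contains s then (if s == "tavern_details" then data else data.insert s (some txt))
     else data, [])
  else (data, sec)

-- A's loop body after `line = line.strip()`
def pvLineA (st : PvStA) (line : String) : PvStA :=
  if line == "" then st
  else if line == "```" then
    let ia := !st.inAscii
    if !ia then
      if !st.ascii.isEmpty then
        { st with inAscii := ia,
                  data := st.data.insert "settlement_art" (some (PySem.Str.join "\n" st.ascii)),
                  ascii := [] }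
      else { st with inAscii := ia }
    else { st with inAscii := ia }
  else if st.inAscii then { st with ascii := st.ascii ++ [line] }
  else if PySem.Str.startswith line "## " then
    let p := pvSaveA st.data st.cur st.sec
    { st with data := p.1, sec := p.2,
              cur := some (PySem.Str.replace (PySem.Str.lower (PySem.Str.slice line (some 3) none)) " " "_") }
  else if pvTruthy st.cur then { st with sec := st.sec ++ [line] }
  else if PySem.Str.startswith line "**" && PySem.Str.endswith line "**" then
    { st with data := st.data.insert "name" (some (PySem.Str.stripChars line "*")) }
  else if pvTruthy (st.data.getD "description" none) then st
  else { st with data := st.data.insert "description" (some line) }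

def pvStepA (st : PvStA) (raw : String) : PvStA := pvLineA st (PySem.Str.strip raw)

def process_ascii_blocks (content : String) : List (String × Option String) :=
  -- content.split('\n'); the separator is non-empty, so split? is always `some`
  let lines := (PySem.Str.split? content "\n").getD []
  let st := lines.foldl pvStepA ⟨pvData0, none, [], false, []⟩
  ((pvSaveA st.data st.cur st.sec).1).items

-- ===== PORT B =====

-- B's state: (data, section, body)
structure PvStB where
  data : PySem.Dict String (Option String)
  sec : Option String
  body : List String

-- Source B's `flush()`
def pvFlushB (data : PySem.Dict String (Option String)) (sec : Option String)
    (body : List String) : PySem.Dict String (Option String) :=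
  if pvTruthy sec && !body.isEmpty && data.contains (sec.getD "")
      && !(sec.getD "" == "tavern_details") then
    data.insert (sec.getD "") (some (PySem.Str.strip (PySem.Str.join "\n" body)))
  else data

-- Source B's text-chunk processing: group the chunk on '## ' headers, then
-- preamble-or-append the head group and walk the header groups
def pvTextB (st : PvStB) (chunk : List String) : PvStB :=
  let p := chunk.foldl
    (fun (p : List (List String) × List String) line =>
      if PySem.Str.startswith line "## " then (p.1 ++ [p.2], [line]) else (p.1, p.2 ++ [line]))
    ([], [])
  let groups := p.1 ++ [p.2]
  let head := groups.headD []
  let st1 :=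
    if !pvTruthy st.sec then
      let d' := head.foldl (fun d line =>
        if PySem.Str.startswith line "**" && PySem.Str.endswith line "**" then
          d.insert "name" (some (PySem.Str.stripChars line "*"))
        else if pvTruthy (d.getD "description" none) then d
        else d.insert "description" (some line)) st.data
      { st with data := d' }
    else { st with body := st.body ++ head }
  (groups.drop 1).foldl
    (fun st grp =>
      -- each group past the head starts with its '## ' header line: grp = hdr :: rest
      { data := pvFlushB st.data st.sec st.body,
        sec := some (PySem.Str.replace (PySem.Str.lower
                 (PySem.Str.slice (grp.headD "") (some 3) none)) " " "_"),
        body := grp.drop 1 })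
    st1

-- Source B's `while True` pair-consuming loop over the chunk list
def pvRunB (st : PvStB) (rest : List (List String)) : PvStB :=
  match rest with
  | [] => st                       -- unreachable: the chunk list is never empty
  | [c] => pvTextB st c
  | [c, _] => pvTextB st c         -- len(rest) < 3: trailing unclosed block dropped
  | c :: a :: rest' =>
      let st1 := pvTextB st c
      let st2 :=
        if !a.isEmpty then
          { st1 with data := st1.data.insert "settlement_art" (some (PySem.Str.join "\n" a)) }
        else st1
      pvRunB st2 rest'

def process_ascii_blocks_alt (content : String) : List (String × Option String) :=
  let lines := (((PySem.Str.split? content "\n").getD []).map PySem.Str.strip).filter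
    (fun s => !(s == ""))
  let p := lines.foldl
    (fun (p : List (List String) × List String) s =>
      if s == "```" then (p.1 ++ [p.2], []) else (p.1, p.2 ++ [s]))
    ([], [])
  let chunks := p.1 ++ [p.2]
  let st := pvRunB ⟨pvData0, none, []⟩ chunks
  (pvFlushB st.data st.sec st.body).items

-- ===== PRECONDITION & SPEC =====
def Spec_process_ascii_blocks (content : String) (out : List (String × Option String)) : Prop := out = process_ascii_blocks_alt content
instance (content : String) (out : List (String × Option String)) : Decidable (Spec_process_ascii_blocks content out) := by unfold Spec_process_ascii_blocks; infer_instance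

-- ===== CLAIM (what is proved, stated in full; the proofs are below) =====
def Claim_equal_process_ascii_blocks : Prop := ∀ (content : String), Dom_process_ascii_blocks content → Spec_process_ascii_blocks content (process_ascii_blocks content)

-- ===== LEMMAS AND PROOFS =====


-- proof-side helpers: B's view of A's state, A's text-mode single-line step, the glue
-- that re-interleaves the fences, and the facts carried through the induction

def pvEmbed (st : PvStB) : PvStA := ⟨st.data, st.sec, st.body, false, []⟩
def pvProj (st : PvStA) : PvStB := ⟨st.data, st.cur, st.sec⟩
def pvI1 (st : PvStB) : Prop := pvTruthy st.sec = false → st.body = []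
def pvGood (x : String) : Prop := x ≠ "```" ∧ x ≠ "" ∧ ∃ raw, x = PySem.Str.strip raw
def pvParse (line : String) : String :=
  PySem.Str.replace (PySem.Str.lower (PySem.Str.slice line (some 3) none)) " " "_"

def pvStepT (st : PvStB) (line : String) : PvStB :=
  if PySem.Str.startswith line "## " then
    ⟨pvFlushB st.data st.sec st.body, some (pvParse line), []⟩
  else if pvTruthy st.sec then { st with body := st.body ++ [line] }
  else if PySem.Str.startswith line "**" && PySem.Str.endswith line "**" then
    { st with data := st.data.insert "name" (some (PySem.Str.stripChars line "*")) }
  else if pvTruthy (st.data.getD "description" none) then st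
  else { st with data := st.data.insert "description" (some line) }

def pvGlue : List (List String) → List String
  | [] => []
  | c :: rest => c ++ (rest.map (fun a => "```" :: a)).flatten

def pvGF : List (List String) × List String → String → List (List String) × List String :=
  fun p line =>
    if PySem.Str.startswith line "## " then (p.1 ++ [p.2], [line]) else (p.1, p.2 ++ [line])

def pvCF : List (List String) × List String → String → List (List String) × List String :=
  fun p s => if s == "```" then (p.1 ++ [p.2], []) else (p.1, p.2 ++ [s])

lemma pv_saveA_fst (d : PySem.Dict String (Option String)) (cur : Option String)
    (sc : List String) : (pvSaveA d cur sc).1 = pvFlushB d cur sc := by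
  simp only [pvSaveA, pvFlushB]
  by_cases ht : pvTruthy cur = true <;>
  by_cases he : sc.isEmpty = true <;>
  by_cases hc : d.contains (cur.getD "") = true <;>
  by_cases htav : (cur.getD "" == "tavern_details") = true <;>
  simp [ht, he, hc, htav]

lemma pv_saveA_snd (d : PySem.Dict String (Option String)) (cur : Option String)
    (sc : List String) (h : pvTruthy cur = false → sc = []) : (pvSaveA d cur sc).2 = [] := by
  simp only [pvSaveA]
  by_cases ht : pvTruthy cur = true
  · by_cases he : sc.isEmpty = true
    · simp [ht, List.isEmpty_iff.mp he]
    · simp [ht, he]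
  · simp [ht, h (by simpa using ht)]

lemma pv_foldA_strip (raws : List String) (st : PvStA) :
    raws.foldl pvStepA st
      = ((raws.map PySem.Str.strip).filter (fun s => !(s == ""))).foldl pvLineA st := by
  rw [List.foldl_filter, List.foldl_map]
  congr 1
  funext st s
  by_cases h : PySem.Str.strip s = "" <;> simp [pvStepA, pvLineA, h]

lemma pv_ascii (a : List String) (d : PySem.Dict String (Option String)) (cur : Option String)
    (sc al : List String) (hg : ∀ x ∈ a, x ≠ "" ∧ x ≠ "```") :
    a.foldl pvLineA ⟨d, cur, sc, true, al⟩ = ⟨d, cur, sc, true, al ++ a⟩ := by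
  induction a generalizing al with
  | nil => simp
  | cons x xs ih =>
    obtain ⟨h1, h2⟩ := hg x (by simp)
    have : pvLineA ⟨d, cur, sc, true, al⟩ x = ⟨d, cur, sc, true, al ++ [x]⟩ := by
      simp [pvLineA, h1, h2]
    rw [List.foldl_cons, this, ih _ (fun y hy => hg y (by simp [hy]))]
    simp
lemma pv_glue_snoc_snoc (xs : List (List String)) (c s' : List String) :
    pvGlue ((xs ++ [c]) ++ [s']) = pvGlue (xs ++ [c]) ++ ("```" :: s') := by
  cases xs with
  | nil => simp [pvGlue]
  | cons x xs' => simp [pvGlue, List.map_append, List.flatten_append]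

lemma pv_glue_last_app (xs : List (List String)) (c : List String) (s : String) :
    pvGlue (xs ++ [c ++ [s]]) = pvGlue (xs ++ [c]) ++ [s] := by
  cases xs with
  | nil => simp [pvGlue]
  | cons x xs' => simp [pvGlue, List.map_append, List.flatten_append]

lemma pv_cf_glue (ls : List String) (acc : List (List String)) (c : List String) :
    pvGlue ((ls.foldl pvCF (acc, c)).1 ++ [(ls.foldl pvCF (acc, c)).2])
      = pvGlue (acc ++ [c]) ++ ls := by
  induction ls generalizing acc c with
  | nil => simp
  | cons s ls ih =>
    rw [List.foldl_cons]
    by_cases h : s = "```"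
    · have : pvCF (acc, c) s = (acc ++ [c], []) := by simp [pvCF, h]
      rw [this, ih, pv_glue_snoc_snoc]
      simp [h]
    · have : pvCF (acc, c) s = (acc, c ++ [s]) := by simp [pvCF, h]
      rw [this, ih, pv_glue_last_app]
      simp

lemma pv_cf_good (ls : List String) (acc : List (List String)) (c : List String)
    (hls : ∀ x ∈ ls, x ≠ "" ∧ ∃ raw, x = PySem.Str.strip raw)
    (hc : ∀ x ∈ c, pvGood x) (hacc : ∀ a ∈ acc, ∀ x ∈ a, pvGood x) :
    (∀ a ∈ (ls.foldl pvCF (acc, c)).1, ∀ x ∈ a, pvGood x)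
      ∧ (∀ x ∈ (ls.foldl pvCF (acc, c)).2, pvGood x) := by
  induction ls generalizing acc c with
  | nil => exact ⟨hacc, hc⟩
  | cons s ls ih =>
    rw [List.foldl_cons]
    by_cases h : s = "```"
    · have : pvCF (acc, c) s = (acc ++ [c], []) := by simp [pvCF, h]
      rw [this]
      refine ih _ _ (fun x hx => hls x (by simp [hx])) (by simp) ?_
      intro a ha
      rcases List.mem_append.mp ha with ha | ha
      · exact hacc a ha
      · simp at ha; subst ha; exact hc
    · have : pvCF (acc, c) s = (acc, c ++ [s]) := by simp [pvCF, h]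
      rw [this]
      refine ih _ _ (fun x hx => hls x (by simp [hx])) ?_ hacc
      intro x hx
      rcases List.mem_append.mp hx with hx | hx
      · exact hc x hx
      · simp at hx; subst hx
        obtain ⟨h1, h2⟩ := hls x (by simp)
        exact ⟨h, h1, h2⟩

lemma pv_gf_last (c : List String) (hne : (c.foldl pvGF ([], [])).1 ≠ []) :
    ∃ h0 t, (c.foldl pvGF ([], [])).2 = h0 :: t
      ∧ PySem.Str.startswith h0 "## " = true ∧ h0 ∈ c := by
  induction c using List.reverseRecOn with
  | nil => simp at hne
  | append_singleton c l ih =>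
    rw [List.foldl_append, List.foldl_cons, List.foldl_nil] at *
    by_cases h : PySem.Str.startswith l "## " = true
    · have : pvGF (c.foldl pvGF ([], [])) l = ((c.foldl pvGF ([], [])).1 ++ [(c.foldl pvGF ([], [])).2], [l]) := by
        simp only [pvGF]; rw [if_pos h]
      rw [this]
      exact ⟨l, [], rfl, h, by simp⟩
    · have : pvGF (c.foldl pvGF ([], [])) l = ((c.foldl pvGF ([], [])).1, (c.foldl pvGF ([], [])).2 ++ [l]) := by
        simp only [pvGF]; rw [if_neg h]
      rw [this] at hne ⊢
      obtain ⟨h0, t, heq, hs, hm⟩ := ih (by simpa using hne)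
      exact ⟨h0, t ++ [l], by simp [heq], hs, by simp [hm]⟩

lemma pv_lineA_step (st : PvStB) (line : String) (hg : pvGood line) (h1 : pvI1 st) :
    pvLineA (pvEmbed st) line = pvEmbed (pvStepT st line) ∧ pvI1 (pvStepT st line) := by
  obtain ⟨hf, hne, hstrip⟩ := hg
  by_cases hh : PySem.Chars.startswith line.toList ['#', '#', ' '] = true
  · constructor
    · simp [pvLineA, pvEmbed, pvStepT, hne, hf, hh, pvParse, pv_saveA_fst,
        pv_saveA_snd _ _ _ h1]
    · simp [pvStepT, pvI1, PySem.Str.startswith, hh]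
  · by_cases hc : pvTruthy st.sec = true
    · constructor
      · simp [pvLineA, pvEmbed, pvStepT, hne, hf, hh, hc]
      · simp [pvStepT, pvI1, PySem.Str.startswith, hh, hc]
    · have hc' : pvTruthy st.sec = false := by simpa using hc
      by_cases ht : PySem.Chars.startswith line.toList ['*', '*'] = true
          ∧ PySem.Chars.endswith line.toList ['*', '*'] = true
      · constructor
        · simp [pvLineA, pvEmbed, pvStepT, hne, hf, hh, hc', ht]
        · simpa [pvStepT, pvI1, PySem.Str.startswith, hh, hc', ht] using h1
      · by_cases hd : pvTruthy (st.data.getD "description" none) = true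
        · constructor
          · simp [pvLineA, pvEmbed, pvStepT, hne, hf, hh, hc', ht, hd]
          · simpa [pvStepT, pvI1, PySem.Str.startswith, hh, hc', ht, hd] using h1
        · constructor
          · simp [pvLineA, pvEmbed, pvStepT, hne, hf, hh, hc', ht, hd]
          · simpa [pvStepT, pvI1, PySem.Str.startswith, hh, hc', ht, hd] using h1

lemma pv_textA (c : List String) (st : PvStB) (hg : ∀ x ∈ c, pvGood x) (h1 : pvI1 st) :
    c.foldl pvLineA (pvEmbed st) = pvEmbed (c.foldl pvStepT st) ∧ pvI1 (c.foldl pvStepT st) := by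
  induction c generalizing st with
  | nil => exact ⟨rfl, h1⟩
  | cons x xs ih =>
    obtain ⟨hstep, hi⟩ := pv_lineA_step st x (hg x (by simp)) h1
    rw [List.foldl_cons, List.foldl_cons, hstep]
    exact ih _ (fun y hy => hg y (by simp [hy])) hi
lemma pv_strip_ne_hash (cs : List Char) : PySem.Chars.strip cs ≠ ['#', '#', ' '] := by
  intro h
  simp only [PySem.Chars.strip, PySem.Chars.rstrip] at h
  have h' : (PySem.Chars.lstrip cs).reverse.dropWhile PySem.Chars.isspace = [' ', '#', '#'] := by
    have := congrArg List.reverse h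
    simpa using this
  have hne : (PySem.Chars.lstrip cs).reverse.dropWhile PySem.Chars.isspace ≠ [] := by
    simp [h']
  have := List.head_dropWhile_not PySem.Chars.isspace hne
  simp [h', PySem.Chars.isspace] at this

lemma pv_replace_go_ne (fuel : Nat) (l acc : List Char) (hacc : acc ≠ []) :
    PySem.Chars.replace.go [' '] ['_'] fuel l acc ≠ [] := by
  induction fuel generalizing l acc with
  | zero => rw [PySem.Chars.replace.go.eq_def]; simp [hacc]
  | succ n ih =>
    rw [PySem.Chars.replace.go.eq_def]
    cases l with
    | nil => simp [hacc]
    | cons c t =>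
      by_cases h : List.isPrefixOf [' '] (c :: t) = true <;> simp only [h, if_true] <;>
        [exact ih _ _ (by simp); exact ih _ _ (by simp)]

lemma pv_replace_ne (s : List Char) (h : s ≠ []) :
    PySem.Chars.replace s [' '] ['_'] ≠ [] := by
  cases s with
  | nil => exact absurd rfl h
  | cons c t =>
    simp only [PySem.Chars.replace, List.isEmpty_cons]
    rw [PySem.Chars.replace.go.eq_def]
    simp only [List.length_cons]
    by_cases hp : List.isPrefixOf [' '] (c :: t) = true <;> simp only [hp, if_true] <;>
      [exact pv_replace_go_ne _ _ _ (by simp); exact pv_replace_go_ne _ _ _ (by simp)]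

lemma pv_parse_ne (line : String) (hg : pvGood line)
    (hh : PySem.Str.startswith line "## " = true) : pvParse line ≠ "" := by
  obtain ⟨-, hne, raw, hraw⟩ := hg
  intro h0
  have hl : (pvParse line).toList = [] := by simp [h0]
  have hpre : ['#', '#', ' '] <+: line.toList := by
    have : PySem.Chars.startswith line.toList ['#', '#', ' '] = true := by simpa using hh
    exact (PySem.Chars.startswith_iff _ _).mp this
  simp only [pvParse, PySem.Str.toList_replace, PySem.Str.toList_lower, PySem.Str.toList_slice,
    PySem.Chars.slice_eq_listSlice, PySem.List.slice_from _ (by norm_num : (0:Int) ≤ 3)] at hl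
  have hd : line.toList.drop 3 ≠ [] := by
    intro hdrop
    have hlen : line.length ≤ 3 := by
      have := List.drop_eq_nil_iff.mp hdrop
      simpa using this
    have h3 : 3 ≤ line.length := by simpa using hpre.length_le
    have heq : line.toList = ['#', '#', ' '] :=
      (List.IsPrefix.eq_of_length hpre (by simp; omega)).symm
    have : PySem.Chars.strip raw.toList = ['#', '#', ' '] := by
      rw [← PySem.Str.toList_strip, ← hraw, heq]
    exact pv_strip_ne_hash raw.toList this
  have hlo : PySem.Chars.lower (line.toList.drop 3) ≠ [] := by
    simp only [PySem.Chars.lower]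
    exact fun hm => hd (List.map_eq_nil_iff.mp hm)
  exact pv_replace_ne _ hlo hl

def pvPre (d : PySem.Dict String (Option String)) (ls : List String) :
    PySem.Dict String (Option String) :=
  ls.foldl (fun d line =>
    if PySem.Str.startswith line "**" && PySem.Str.endswith line "**" then
      d.insert "name" (some (PySem.Str.stripChars line "*"))
    else if pvTruthy (d.getD "description" none) then d
    else d.insert "description" (some line)) d

def pvHdrStep (st : PvStB) (grp : List String) : PvStB :=
  ⟨pvFlushB st.data st.sec st.body, some (pvParse (grp.headD "")), grp.drop 1⟩

def pvTextGroups (st : PvStB) (groups : List (List String)) : PvStB :=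
  let head := groups.headD []
  let st1 :=
    if !pvTruthy st.sec then { st with data := pvPre st.data head }
    else { st with body := st.body ++ head }
  (groups.drop 1).foldl pvHdrStep st1

lemma pv_textB_groups (st : PvStB) (c : List String) :
    pvTextB st c
      = pvTextGroups st ((c.foldl pvGF ([], [])).1 ++ [(c.foldl pvGF ([], [])).2]) := rfl

lemma pv_textB (c : List String) (st : PvStB) (hg : ∀ x ∈ c, pvGood x) :
    pvTextB st c = c.foldl pvStepT st := by
  induction c using List.reverseRecOn generalizing st with
  | nil =>
    rw [pv_textB_groups]
    simp only [List.foldl_nil, pvTextGroups, List.headD, List.drop_one]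
    by_cases h : pvTruthy st.sec = true <;> simp [h, pvPre]
  | append_singleton c l ih =>
    rw [pv_textB_groups, List.foldl_append, List.foldl_cons, List.foldl_nil,
      List.foldl_append, List.foldl_cons, List.foldl_nil, ← ih _ (fun x hx => hg x (by simp [hx])),
      pv_textB_groups]
    set P := (c.foldl pvGF ([], [])) with hP
    by_cases hl : PySem.Str.startswith l "## " = true
    · have hstep : pvGF P l = (P.1 ++ [P.2], [l]) := by simp only [pvGF]; rw [if_pos hl]
      rw [hstep]
      simp only [pvTextGroups]
      have hhead : ((P.1 ++ [P.2]) ++ [[l]]).headD [] = (P.1 ++ [P.2]).headD [] := by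
        cases h : P.1 with
        | nil => simp
        | cons g0 gs' => simp
      have hdrop : ((P.1 ++ [P.2]) ++ [[l]]).drop 1 = (P.1 ++ [P.2]).drop 1 ++ [[l]] := by
        cases h : P.1 with
        | nil => simp
        | cons g0 gs' => simp
      rw [hhead, hdrop, List.foldl_append, List.foldl_cons, List.foldl_nil]
      simp only [pvStepT, hl, if_pos]
      simp [pvHdrStep]
    · have hstep : pvGF P l = (P.1, P.2 ++ [l]) := by simp only [pvGF]; rw [if_neg hl]
      rw [hstep]
      cases hP1 : P.1 with
      | nil =>
        simp only [pvTextGroups, List.nil_append, List.headD_cons, List.drop_one,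
          List.tail_cons, List.foldl_nil]
        have hl' : PySem.Chars.startswith l.toList ['#', '#', ' '] = false := by
          simpa using hl
        by_cases hsec : pvTruthy st.sec = true
        · simp only [hsec, Bool.not_true, Bool.false_eq_true, if_false]
          simp [pvStepT, hl', hsec]
        · have hsec' : pvTruthy st.sec = false := by simpa using hsec
          simp only [hsec', Bool.not_false, if_true]
          simp [pvStepT, hl', hsec', pvPre, List.foldl_append]
          split_ifs <;> rfl
      | cons g0 gs' =>
        have hne : P.1 ≠ [] := by simp [hP1]
        obtain ⟨h0, t, hg2, hsh, hmem⟩ := pv_gf_last c (by rw [hP] at hne; exact hne)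
        rw [← hP] at hg2
        simp only [pvTextGroups]
        have hhead : ((g0 :: gs') ++ [P.2 ++ [l]]).headD ([] : List String) = ((g0 :: gs') ++ [P.2]).headD [] := by simp
        have hdrop1 : ((g0 :: gs') ++ [P.2 ++ [l]]).drop 1 = (gs' ++ [P.2 ++ [l]]) := by simp
        have hdrop2 : ((g0 :: gs') ++ [P.2]).drop 1 = (gs' ++ [P.2]) := by simp
        rw [hhead, hdrop1, hdrop2, List.foldl_append, List.foldl_append, List.foldl_cons,
          List.foldl_cons, List.foldl_nil, List.foldl_nil]
        have hparse : pvParse h0 ≠ "" :=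
          pv_parse_ne h0 (hg h0 (by simp [hmem])) hsh
        rw [hg2]
        simp only [pvHdrStep, pvStepT, List.headD_cons, List.cons_append, List.drop_succ_cons,
          List.drop_zero, hl]
        simp [hparse, pvTruthy]

lemma pv_fence_open (st : PvStB) :
    pvLineA (pvEmbed st) "```" = ⟨st.data, st.sec, st.body, true, []⟩ := by
  simp [pvLineA, pvEmbed]

lemma pv_fence_close (d : PySem.Dict String (Option String)) (cur : Option String)
    (sc a : List String) :
    pvLineA ⟨d, cur, sc, true, a⟩ "```"
      = pvEmbed (if !a.isEmpty then
          ⟨d.insert "settlement_art" (some (PySem.Str.join "\n" a)), cur, sc⟩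
        else ⟨d, cur, sc⟩) := by
  by_cases h : a.isEmpty = true <;>
    simp [pvLineA, pvEmbed, h, List.isEmpty_iff.mp]

lemma pv_main_aux (n : Nat) : ∀ (chunks : List (List String)) (st : PvStB),
    chunks.length ≤ n → (∀ a ∈ chunks, ∀ x ∈ a, pvGood x) → pvI1 st →
    pvProj ((pvGlue chunks).foldl pvLineA (pvEmbed st)) = pvRunB st chunks
      ∧ pvI1 (pvRunB st chunks) := by
  induction n with
  | zero =>
    intro chunks st hlen hg h1
    have hc : chunks = [] := List.length_eq_zero_iff.mp (Nat.le_zero.mp hlen)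
    subst hc
    exact ⟨rfl, h1⟩
  | succ n ih =>
    intro chunks st hlen hg h1
    match chunks with
    | [] => exact ⟨rfl, h1⟩
    | [c] =>
      have hgc : ∀ x ∈ c, pvGood x := hg c (by simp)
      obtain ⟨hA, hI⟩ := pv_textA c st hgc h1
      have hglue : pvGlue [c] = c := by simp [pvGlue]
      have hrun : pvRunB st [c] = pvTextB st c := rfl
      rw [hglue, hA, hrun, pv_textB c st hgc]
      exact ⟨rfl, hI⟩
    | [c, a] =>
      have hgc : ∀ x ∈ c, pvGood x := hg c (by simp)
      obtain ⟨hA, hI⟩ := pv_textA c st hgc h1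
      have hglue : pvGlue [c, a] = c ++ ("```" :: a) := by simp [pvGlue]
      have hrun : pvRunB st [c, a] = pvTextB st c := rfl
      rw [hglue, List.foldl_append, hA, List.foldl_cons, pv_fence_open, pv_ascii a _ _ _ _
        (fun x hx => ⟨((hg a (by simp)) x hx).2.1, ((hg a (by simp)) x hx).1⟩),
        hrun, pv_textB c st hgc]
      exact ⟨rfl, hI⟩
    | c :: a :: r0 :: rs =>
      have hgc : ∀ x ∈ c, pvGood x := hg c (by simp)
      obtain ⟨hA, hI⟩ := pv_textA c st hgc h1
      have hglue : pvGlue (c :: a :: r0 :: rs)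
          = c ++ ("```" :: (a ++ ("```" :: pvGlue (r0 :: rs)))) := by
        simp [pvGlue]
      set X := c.foldl pvStepT st with hX
      set X2 := if !a.isEmpty then
          (⟨X.data.insert "settlement_art" (some (PySem.Str.join "\n" a)), X.sec, X.body⟩ : PvStB)
        else X with hX2
      have hI2 : pvI1 X2 := by
        by_cases h : a.isEmpty = true <;> simp only [hX2, h, Bool.not_true, Bool.not_false,
          Bool.false_eq_true, if_true, if_false] <;> [exact hI; exact hI]
      have hfold : (pvGlue (c :: a :: r0 :: rs)).foldl pvLineA (pvEmbed st)
          = (pvGlue (r0 :: rs)).foldl pvLineA (pvEmbed X2) := by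
        rw [hglue, List.foldl_append, hA, List.foldl_cons, pv_fence_open, List.foldl_append,
          pv_ascii a _ _ _ _ (fun x hx => ⟨((hg a (by simp)) x hx).2.1, ((hg a (by simp)) x hx).1⟩),
          List.foldl_cons, List.nil_append, pv_fence_close]
      have hrun : pvRunB st (c :: a :: r0 :: rs) = pvRunB X2 (r0 :: rs) := by
        have h0 : pvRunB st (c :: a :: r0 :: rs)
            = pvRunB (if !a.isEmpty then
                ⟨(pvTextB st c).data.insert "settlement_art" (some (PySem.Str.join "\n" a)),
                  (pvTextB st c).sec, (pvTextB st c).body⟩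
              else pvTextB st c) (r0 :: rs) := rfl
        rw [h0, pv_textB c st hgc]
      obtain ⟨hmain, hIr⟩ := ih (r0 :: rs) X2 (by simp at hlen ⊢; omega)
        (fun b hb => hg b (by simp at hb ⊢; tauto)) hI2
      rw [hfold, hrun]
      exact ⟨hmain, hIr⟩

-- ===== VERDICT (by name: the statement is the Claim_ definition above) =====
theorem process_ascii_blocks_spec : Claim_equal_process_ascii_blocks := by
  intro content _
  unfold Spec_process_ascii_blocks
  simp only [process_ascii_blocks, process_ascii_blocks_alt]
  rw [pv_foldA_strip]
  set raws := (PySem.Str.split? content "\n").getD [] with hraws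
  set lines := (raws.map PySem.Str.strip).filter (fun s => !(s == "")) with hlines
  have hcf : (fun (p : List (List String) × List String) s =>
      if s == "```" then (p.1 ++ [p.2], []) else (p.1, p.2 ++ [s])) = pvCF := rfl
  rw [hcf]
  set P := lines.foldl pvCF ([], []) with hPdef
  have hlines_good : ∀ x ∈ lines, x ≠ "" ∧ ∃ raw, x = PySem.Str.strip raw := by
    intro x hx
    refine ⟨by simpa using (List.mem_filter.mp hx).2, ?_⟩
    obtain ⟨raw, -, hr⟩ := List.mem_map.mp (List.mem_filter.mp hx).1
    exact ⟨raw, hr.symm⟩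
  have hgood : ∀ a ∈ P.1 ++ [P.2], ∀ x ∈ a, pvGood x := by
    obtain ⟨hg1, hg2⟩ := pv_cf_good lines [] [] hlines_good (by simp) (by simp)
    intro a ha
    rcases List.mem_append.mp ha with ha | ha
    · exact hg1 a ha
    · simp at ha; subst ha; exact hg2
  have hglue : pvGlue (P.1 ++ [P.2]) = lines := by
    have := pv_cf_glue lines [] []
    simpa [pvGlue] using this
  obtain ⟨hmain, -⟩ := pv_main_aux (P.1 ++ [P.2]).length (P.1 ++ [P.2])
    ⟨pvData0, none, []⟩ le_rfl hgood (fun _ => rfl)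
  rw [hglue] at hmain
  have hd : (lines.foldl pvLineA ⟨pvData0, none, [], false, []⟩).data
      = (pvRunB ⟨pvData0, none, []⟩ (P.1 ++ [P.2])).data := congrArg PvStB.data hmain
  have hc : (lines.foldl pvLineA ⟨pvData0, none, [], false, []⟩).cur
      = (pvRunB ⟨pvData0, none, []⟩ (P.1 ++ [P.2])).sec := congrArg PvStB.sec hmain
  have hs : (lines.foldl pvLineA ⟨pvData0, none, [], false, []⟩).sec
      = (pvRunB ⟨pvData0, none, []⟩ (P.1 ++ [P.2])).body := congrArg PvStB.body hmain
  rw [pv_saveA_fst, hd, hc, hs]
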